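-- pv_equiv track=rewrite | github.com/Andrew-Mereuta/NetworkingFinal | main.py | calculate_nodes_by_first_contact_timestamp
-- ===== SOURCE A (Python) =====
-- def calculate_nodes_by_first_contact_timestamp(hyperlinks_by_timestamp):
--     first_contact_timestamp_by_node = {}
--     for (timestamp, hyperlinks) in hyperlinks_by_timestamp.items():
--         for hyperlink in hyperlinks:
--             for node in hyperlink:
--                 if node in first_contact_timestamp_by_node:
--                     first_contact_timestamp_by_node[node] = min(timestamp, first_contact_timestamp_by_node[node])
--                 else:
--                     first_contact_timestamp_by_node[node] = timestamp
--     first_contact_timestamp_by_node = dict(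
--         sorted(first_contact_timestamp_by_node.items(), key=lambda item: item[1], reverse=True))
--     sorted_grouped = {}
--     for node, timestamp in sorted(first_contact_timestamp_by_node.items()):
--         if timestamp in sorted_grouped:
--             sorted_grouped[timestamp].append(node)
--         else:
--             sorted_grouped[timestamp] = [node]
--     return dict(sorted(sorted_grouped.items(), key=lambda x: x[0]))
-- ===== SOURCE B (Python) =====
-- def calculate_nodes_by_first_contact_timestamp(hyperlinks_by_timestamp):
--     seen = set()
--     groups = {}
--     for timestamp in sorted(hyperlinks_by_timestamp):
--         for hyperlink in hyperlinks_by_timestamp[timestamp]: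
--             for node in hyperlink:
--                 if node not in seen:
--                     seen.add(node)
--                     groups[timestamp] = groups.get(timestamp, []) + [node]
--     return {timestamp: sorted(nodes) for timestamp, nodes in groups.items()}
-- ===== Notes on version B (the rewrite author's own statement) =====
-- stated objective: simpler
-- what changed: Instead of A's three-stage pipeline (build a min-timestamp-per-node dict over all entries, reverse-sort it by value only to rebuild it, then regroup the node-sorted items by timestamp and sort the groups), B makes a single sweep over the timestamps in ascending order with a `seen` set, appending each newly seen node to its timestamp's group, and finally sorts each group's node list.
import Mathlib
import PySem

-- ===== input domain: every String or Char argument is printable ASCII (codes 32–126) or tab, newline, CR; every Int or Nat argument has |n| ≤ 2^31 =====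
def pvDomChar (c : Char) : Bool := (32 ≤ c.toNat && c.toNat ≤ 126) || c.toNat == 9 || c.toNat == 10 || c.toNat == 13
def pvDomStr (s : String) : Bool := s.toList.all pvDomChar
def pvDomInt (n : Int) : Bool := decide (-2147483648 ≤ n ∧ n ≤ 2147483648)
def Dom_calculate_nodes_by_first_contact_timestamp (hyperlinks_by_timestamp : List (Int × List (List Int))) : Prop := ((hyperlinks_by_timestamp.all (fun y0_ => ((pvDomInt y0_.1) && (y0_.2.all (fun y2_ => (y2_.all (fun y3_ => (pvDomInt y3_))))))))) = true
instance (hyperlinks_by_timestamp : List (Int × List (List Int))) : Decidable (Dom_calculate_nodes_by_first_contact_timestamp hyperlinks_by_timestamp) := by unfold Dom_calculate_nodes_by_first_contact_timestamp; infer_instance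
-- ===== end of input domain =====

-- B replaces A's three-stage pipeline (min-timestamp dict, throwaway reverse sort, regroup of the
-- node-sorted items) by one ascending sweep over the sorted timestamps with a `seen` set; objective: simpler.

-- ===== PORT A =====
-- A-side helpers: the named loop bodies of A's three loops.
-- 'node in d' followed by 'd[node]' is ported as one get? (some ↔ membership, exact).
def pvMinStep (ts : Int) (d : PySem.Dict Int Int) (node : Int) : PySem.Dict Int Int :=
  match d.get? node with
  | some t => d.insert node (min ts t)
  | none   => d.insert node ts

def pvFcs (l : List (Int × List (List Int))) : PySem.Dict Int Int :=
  l.foldl (fun d p => p.2.foldl (fun d hyperlink => hyperlink.foldl (pvMinStep p.1) d) d)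
    PySem.Dict.empty

-- 'sorted_grouped[timestamp].append(node)' mutates the stored list: insert at a present key
-- overwrites in place, which is exactly Python's in-place append on the dict's value.
def pvGroupStep (g : PySem.Dict Int (List Int)) (p : Int × Int) : PySem.Dict Int (List Int) :=
  match g.get? p.2 with
  | some xs => g.insert p.2 (xs ++ [p.1])
  | none    => g.insert p.2 [p.1]

-- Python's sorted(d.items()) compares (node, ts) tuples lexicographically; a dict's keys are
-- distinct, so sorting by the node alone (stable) is exact.
def calculate_nodes_by_first_contact_timestamp (hyperlinks_by_timestamp : List (Int × List (List Int))) : List (Int × List Int) :=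
  let fcs := pvFcs hyperlinks_by_timestamp
  let fcs2 := PySem.Dict.ofList (PySem.List.sorted fcs.items (fun it => it.2) true)
  let sorted_grouped :=
    (PySem.List.sorted fcs2.items (fun it => it.1) false).foldl pvGroupStep PySem.Dict.empty
  (PySem.Dict.ofList (PySem.List.sorted sorted_grouped.items (fun x => x.1) false)).items

-- ===== PORT B =====
-- B-side helper: the body of B's 'for timestamp in sorted(hyperlinks_by_timestamp)'.
-- 'hyperlinks_by_timestamp[timestamp]' is a dict subscript: Dict.mk wraps the association list
-- (first-match lookup); the [] default is unreachable since timestamp is one of the keys.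
-- 'groups[timestamp] = groups.get(timestamp, []) + [node]' is Dict.modify.
def pvBStep (l : List (Int × List (List Int))) (sg : PySem.Set Int × PySem.Dict Int (List Int))
    (timestamp : Int) : PySem.Set Int × PySem.Dict Int (List Int) :=
  ((PySem.Dict.mk l).getD timestamp []).foldl (fun sg hyperlink =>
    hyperlink.foldl (fun sg node =>
      if PySem.Set.contains sg.1 node then sg
      else (PySem.Set.add sg.1 node, sg.2.modify timestamp [] (· ++ [node]))) sg) sg

-- the final dict comprehension iterates groups' (distinct) keys in order: a map over its items.
def calculate_nodes_by_first_contact_timestamp_alt (hyperlinks_by_timestamp : List (Int × List (List Int))) : List (Int × List Int) :=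
  let fin :=
    (PySem.List.sorted (hyperlinks_by_timestamp.map Prod.fst) (fun x => x) false).foldl
      (pvBStep hyperlinks_by_timestamp)
      ((PySem.Set.empty : PySem.Set Int), (PySem.Dict.empty : PySem.Dict Int (List Int)))
  fin.2.items.map (fun p => (p.1, PySem.List.sorted p.2 (fun x => x) false))

-- ===== PRECONDITION & SPEC =====
-- Pre_ excludes nothing a Python caller can supply: the association list stands for a Python dict,
-- whose keys are necessarily distinct; it merely rules out degenerate lists with duplicate keys.
def Pre_calculate_nodes_by_first_contact_timestamp (hyperlinks_by_timestamp : List (Int × List (List Int))) : Prop :=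
  (hyperlinks_by_timestamp.map Prod.fst).Nodup
instance (hyperlinks_by_timestamp : List (Int × List (List Int))) : Decidable (Pre_calculate_nodes_by_first_contact_timestamp hyperlinks_by_timestamp) := by unfold Pre_calculate_nodes_by_first_contact_timestamp; infer_instance
def pvWitness_calculate_nodes_by_first_contact_timestamp : (List (Int × List (List Int))) := [(2, [[1, 3], [3]]), (1, [[3, 4]])]
def Spec_calculate_nodes_by_first_contact_timestamp (hyperlinks_by_timestamp : List (Int × List (List Int))) (out : List (Int × List Int)) : Prop := out = calculate_nodes_by_first_contact_timestamp_alt hyperlinks_by_timestamp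
instance (hyperlinks_by_timestamp : List (Int × List (List Int))) (out : List (Int × List Int)) : Decidable (Spec_calculate_nodes_by_first_contact_timestamp hyperlinks_by_timestamp out) := by unfold Spec_calculate_nodes_by_first_contact_timestamp; infer_instance

-- ===== CLAIM (what is proved, stated in full; the proofs are below) =====
def Claim_equal_calculate_nodes_by_first_contact_timestamp : Prop := ∀ (hyperlinks_by_timestamp : List (Int × List (List Int))), Dom_calculate_nodes_by_first_contact_timestamp hyperlinks_by_timestamp → Pre_calculate_nodes_by_first_contact_timestamp hyperlinks_by_timestamp → Spec_calculate_nodes_by_first_contact_timestamp hyperlinks_by_timestamp (calculate_nodes_by_first_contact_timestamp hyperlinks_by_timestamp)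

-- ===== LEMMAS AND PROOFS =====

/- Both programs are shown equal to one canonical value: the list of pairs
   (t, nodes whose minimal contact timestamp is t) over the ascending distinct first-contact
   timestamps, each node group ascending.  A's and B's pipelines are reduced to it separately. -/

def pvCombine (ts : Int) : Option Int → Option Int
  | some t => some (min ts t)
  | none   => some ts

def pvOcc (p : Int × List (List Int)) (n : Int) : Bool := p.2.any (fun hl => hl.contains n)

def pvFc (l : List (Int × List (List Int))) (n : Int) : Option Int :=
  l.foldl (fun o p => if pvOcc p n then pvCombine p.1 o else o) none

def pvOccKeys (l : List (Int × List (List Int))) (n : Int) : List Int :=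
  (l.filter (fun p => pvOcc p n)).map (fun p => p.1)

def pvXs (l : List (Int × List (List Int))) : List (Int × Int) :=
  PySem.List.sorted (pvFcs l).items (fun it => it.1) false

def pvGA (l : List (Int × List (List Int))) (t : Int) : List Int :=
  ((pvXs l).filter (fun p => p.2 == t)).map (fun p => p.1)

def pvK (l : List (Int × List (List Int))) : List Int :=
  PySem.List.sorted (PySem.Set.ofList ((pvXs l).map (fun p => p.2))) (fun x => x) false

def pvEvList (l : List (Int × List (List Int))) (ts : Int) : List (Int × Int) :=
  (((PySem.Dict.mk l).getD ts []).flatten).map (fun n => (ts, n))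

def pvEvStep (sg : PySem.Set Int × PySem.Dict Int (List Int)) (e : Int × Int) :
    PySem.Set Int × PySem.Dict Int (List Int) :=
  if PySem.Set.contains sg.1 e.2 then sg
  else (PySem.Set.add sg.1 e.2, sg.2.modify e.1 [] (· ++ [e.2]))

def pvNews (s : PySem.Set Int) : List (Int × Int) → List (Int × Int)
  | [] => []
  | e :: evs => if PySem.Set.contains s e.2 then pvNews s evs else e :: pvNews (PySem.Set.add s e.2) evs

def pvKs (l : List (Int × List (List Int))) : List Int :=
  PySem.List.sorted (l.map Prod.fst) (fun x => x) false

def pvEvents (l : List (Int × List (List Int))) : List (Int × Int) :=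
  (pvKs l).flatMap (pvEvList l)

def pvN (l : List (Int × List (List Int))) : List (Int × Int) := pvNews [] (pvEvents l)

-- ---- generic small facts ----

theorem pv_pairwise_of_forall {α : Type} {R : α → α → Prop} (h : ∀ a b, R a b) :
    ∀ l : List α, l.Pairwise R
  | [] => List.Pairwise.nil
  | a :: l => List.Pairwise.cons (fun b _ => h a b) (pv_pairwise_of_forall h l)

theorem pv_find?_beq (n : Int) : ∀ ns : List Int,
    ns.find? (fun m => m == n) = if n ∈ ns then some n else none := by
  intro ns
  induction ns with
  | nil => simp
  | cons m ns ih =>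
    by_cases h : m = n
    · subst h; simp [List.find?_cons_of_pos]
    · rw [List.find?_cons_of_neg (by simp [h])]
      simp [ih, h, Ne.symm h]

theorem pv_set_contains (s : PySem.Set Int) (x : Int) : PySem.Set.contains s x = true ↔ x ∈ s := by
  simp [PySem.Set.contains]

theorem pv_ofList_sublist : ∀ xs : List Int, (PySem.Set.ofList xs).Sublist xs := by
  intro xs
  induction xs with
  | nil => simp
  | cons x xs ih =>
    rw [PySem.Set.ofList_cons]
    refine List.Sublist.cons₂ x ?_
    have hd : ((PySem.Set.ofList xs).discard x).Sublist (PySem.Set.ofList xs) := by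
      rw [show (PySem.Set.ofList xs).discard x = (PySem.Set.ofList xs).filter (fun y => !(y == x)) from rfl]
      exact List.filter_sublist
    exact hd.trans ih

-- ---- A-side: the min dict ----

theorem pvCombine_idem (ts : Int) (o : Option Int) : pvCombine ts (pvCombine ts o) = pvCombine ts o := by
  cases o <;> simp [pvCombine] <;> omega

theorem pvMinStep_get? (ts : Int) (d : PySem.Dict Int Int) (m n : Int) :
    (pvMinStep ts d m).get? n = if n = m then pvCombine ts (d.get? m) else d.get? n := by
  unfold pvMinStep
  cases h : d.get? m <;> by_cases hn : n = m <;>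
    simp [h, hn, PySem.Dict.get?_insert_self, PySem.Dict.get?_insert_of_ne, pvCombine]

theorem pv_fold_hl (ts n : Int) : ∀ (hl : List Int) (d : PySem.Dict Int Int),
    (hl.foldl (pvMinStep ts) d).get? n =
      if hl.contains n then pvCombine ts (d.get? n) else d.get? n := by
  intro hl
  induction hl with
  | nil => intro d; simp
  | cons m hl ih =>
    intro d
    simp only [List.foldl_cons, ih, pvMinStep_get?]
    by_cases hm : n = m
    · subst hm; simp [pvCombine_idem]
    · simp [hm, Ne.symm hm, List.contains_cons, show (n == m) = false by simp [hm]]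

theorem pv_fold_hls (ts n : Int) : ∀ (hls : List (List Int)) (d : PySem.Dict Int Int),
    (hls.foldl (fun d hl => hl.foldl (pvMinStep ts) d) d).get? n =
      if hls.any (fun hl => hl.contains n) then pvCombine ts (d.get? n) else d.get? n := by
  intro hls
  induction hls with
  | nil => intro d; simp
  | cons hl hls ih =>
    intro d
    rw [List.foldl_cons, ih, pv_fold_hl, List.any_cons]
    cases h1 : hl.contains n <;> cases h2 : hls.any (fun hl => hl.contains n) <;>
      simp [pvCombine_idem]

theorem pv_fold_l (n : Int) : ∀ (l : List (Int × List (List Int))) (d : PySem.Dict Int Int),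
    (l.foldl (fun d p => p.2.foldl (fun d hyperlink => hyperlink.foldl (pvMinStep p.1) d) d) d).get? n =
      l.foldl (fun o p => if pvOcc p n then pvCombine p.1 o else o) (d.get? n) := by
  intro l
  induction l with
  | nil => intro d; simp
  | cons p l ih =>
    intro d
    rw [List.foldl_cons, ih, pv_fold_hls]
    rfl

theorem pvFcs_get? (l : List (Int × List (List Int))) (n : Int) :
    (pvFcs l).get? n = pvFc l n := by
  unfold pvFcs pvFc
  rw [pv_fold_l]
  simp [PySem.Dict.get?_empty]

theorem pvFcs_keys_nodup (l : List (Int × List (List Int))) : (pvFcs l).keys.Nodup := by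
  unfold pvFcs
  have h1 : ∀ (hl : List Int) (ts : Int) (d : PySem.Dict Int Int), d.keys.Nodup →
      (hl.foldl (pvMinStep ts) d).keys.Nodup := by
    intro hl ts
    induction hl with
    | nil => intro d h; simpa using h
    | cons m hl ih =>
      intro d h
      refine ih _ ?_
      unfold pvMinStep
      cases hg : d.get? m <;> exact PySem.Dict.nodup_keys_insert _ _ _ h
  have h2 : ∀ (hls : List (List Int)) (ts : Int) (d : PySem.Dict Int Int), d.keys.Nodup →
      (hls.foldl (fun d hl => hl.foldl (pvMinStep ts) d) d).keys.Nodup := by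
    intro hls ts
    induction hls with
    | nil => intro d h; simpa using h
    | cons hl hls ih => intro d h; exact ih _ (h1 hl ts d h)
  have h3 : ∀ (l : List (Int × List (List Int))) (d : PySem.Dict Int Int), d.keys.Nodup →
      (l.foldl (fun d p => p.2.foldl (fun d hyperlink => hyperlink.foldl (pvMinStep p.1) d) d) d).keys.Nodup := by
    intro l
    induction l with
    | nil => intro d h; simpa using h
    | cons p l ih => intro d h; exact ih _ (h2 p.2 p.1 d h)
  exact h3 l _ (by simp [PySem.Dict.nodup_keys_empty])

-- ---- pvFc as a minimum ----

theorem pv_fold_combine_some : ∀ (ks : List Int) (u : Int),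
    ks.foldl (fun o ts => pvCombine ts o) (some u) = some (ks.foldl min u) := by
  intro ks
  induction ks with
  | nil => intro u; simp
  | cons k ks ih =>
    intro u
    simp only [List.foldl_cons]
    rw [show pvCombine k (some u) = some (min k u) from rfl, ih, min_comm k u]

theorem pv_foldl_min_le : ∀ (ks : List Int) (u : Int),
    ks.foldl min u ≤ u ∧ ∀ x ∈ ks, ks.foldl min u ≤ x := by
  intro ks
  induction ks with
  | nil => intro u; simp
  | cons k ks ih =>
    intro u
    obtain ⟨h1, h2⟩ := ih (min u k)
    refine ⟨le_trans h1 (by omega), ?_⟩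
    intro x hx
    rcases List.mem_cons.mp hx with h | h
    · subst h; exact le_trans h1 (by omega)
    · exact h2 x h

theorem pv_foldl_min_mem : ∀ (ks : List Int) (u : Int),
    ks.foldl min u = u ∨ ks.foldl min u ∈ ks := by
  intro ks
  induction ks with
  | nil => intro u; simp
  | cons k ks ih =>
    intro u
    rcases ih (min u k) with h | h
    · rcases min_choice u k with h' | h'
      · left; rw [List.foldl_cons, h, h']
      · right; rw [List.foldl_cons, h, h']; exact List.mem_cons_self
    · right; exact List.mem_cons_of_mem _ h

theorem pvFc_eq_fold (l : List (Int × List (List Int))) (n : Int) :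
    pvFc l n = (pvOccKeys l n).foldl (fun o ts => pvCombine ts o) none := by
  unfold pvFc pvOccKeys
  rw [List.foldl_map, List.foldl_filter]

theorem pvFc_some_iff (l : List (Int × List (List Int))) (n t : Int) :
    pvFc l n = some t ↔ (t ∈ pvOccKeys l n ∧ ∀ u ∈ pvOccKeys l n, t ≤ u) := by
  rw [pvFc_eq_fold]
  cases hks : pvOccKeys l n with
  | nil => simp
  | cons k ks =>
    simp only [List.foldl_cons, show pvCombine k none = some k from rfl, pv_fold_combine_some]
    constructor
    · rintro h
      injection h with h
      subst h
      obtain ⟨h1, h2⟩ := pv_foldl_min_le ks k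
      constructor
      · rcases pv_foldl_min_mem ks k with h | h
        · rw [h]; exact List.mem_cons_self
        · exact List.mem_cons_of_mem _ h
      · intro u hu
        rcases List.mem_cons.mp hu with h | h
        · subst h; exact h1
        · exact h2 u h
    · rintro ⟨h1, h2⟩
      obtain ⟨h3, h4⟩ := pv_foldl_min_le ks k
      congr 1
      have ht : t ≤ ks.foldl min k := by
        rcases pv_foldl_min_mem ks k with h | h
        · rw [h]; exact h2 k List.mem_cons_self
        · exact h2 _ (List.mem_cons_of_mem _ h)
      have : ks.foldl min k ≤ t := by
        rcases List.mem_cons.mp h1 with h | h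
        · subst h; exact h3
        · exact h4 t h
      omega

-- ---- A-side: characterisation of the output ----

theorem pvXs_pairwise (l : List (Int × List (List Int))) :
    (pvXs l).Pairwise (fun a b => a.1 < b.1) := by
  have hle := PySem.List.sorted_pairwise (pvFcs l).items (fun it : Int × Int => it.1)
  have hperm : ((pvXs l).map Prod.fst).Perm ((pvFcs l).items.map Prod.fst) :=
    (PySem.List.sorted_perm _ _ _).map Prod.fst
  have hnd : ((pvXs l).map Prod.fst).Nodup := by
    refine hperm.nodup_iff.mpr ?_
    have := pvFcs_keys_nodup l
    simpa [PySem.Dict.keys] using this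
  have hne : (pvXs l).Pairwise (fun a b => a.1 ≠ b.1) := by
    rw [List.Nodup, List.pairwise_map] at hnd
    exact hnd
  exact (hle.and hne).imp (fun h => lt_of_le_of_ne h.1 h.2)

theorem pvXs_mem (l : List (Int × List (List Int))) (n u : Int) :
    (n, u) ∈ pvXs l ↔ pvFc l n = some u := by
  rw [← pvFcs_get? l n]
  unfold pvXs
  rw [PySem.List.mem_sorted]
  exact (PySem.Dict.get?_eq_some_iff_mem_items _ n u (pvFcs_keys_nodup l)).symm

theorem pv_items_ofList (zs : List (Int × List Int)) (h : (zs.map (fun p : Int × List Int => p.1)).Nodup) :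
    (PySem.Dict.ofList zs).items = zs := by
  have hfresh : ∀ a ∈ zs, (PySem.Dict.empty : PySem.Dict Int (List Int)).contains a.1 = false := by
    simp [PySem.Dict.contains_empty]
  have := PySem.Dict.items_foldl_insert_fresh (l := zs) (k := fun p => p.1) (v := fun p => p.2)
    (d := PySem.Dict.empty) hfresh h
  simpa using this

theorem pv_items_ofList_int (zs : List (Int × Int)) (h : (zs.map (fun p : Int × Int => p.1)).Nodup) :
    (PySem.Dict.ofList zs).items = zs := by
  have hfresh : ∀ a ∈ zs, (PySem.Dict.empty : PySem.Dict Int Int).contains a.1 = false := by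
    simp [PySem.Dict.contains_empty]
  have := PySem.Dict.items_foldl_insert_fresh (l := zs) (k := fun p => p.1) (v := fun p => p.2)
    (d := PySem.Dict.empty) hfresh h
  simpa using this

theorem pvGroupStep_eq_modify (g : PySem.Dict Int (List Int)) (p : Int × Int) :
    pvGroupStep g p = g.modify p.2 [] (· ++ [p.1]) := by
  unfold pvGroupStep
  cases h : g.get? p.2 with
  | none =>
    have hD : g.getD p.2 [] = [] := PySem.Dict.getD_of_get?_eq_none _ _ h
    show _ = g.insert p.2 ((g.getD p.2 []) ++ [p.1])
    rw [hD]
    rfl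
  | some xs =>
    have hD : g.getD p.2 [] = xs := PySem.Dict.getD_of_get?_eq_some _ _ h
    show _ = g.insert p.2 ((g.getD p.2 []) ++ [p.1])
    rw [hD]

theorem pvA_eq (l : List (Int × List (List Int))) :
    calculate_nodes_by_first_contact_timestamp l = (pvK l).map (fun t => (t, pvGA l t)) := by
  unfold calculate_nodes_by_first_contact_timestamp
  dsimp only
  -- fcs2.items = the reverse-sorted items list
  have hknd : ((pvFcs l).items.map (fun p : Int × Int => p.1)).Nodup := by
    have := pvFcs_keys_nodup l; simpa [PySem.Dict.keys] using this
  set ys := PySem.List.sorted (pvFcs l).items (fun it : Int × Int => it.2) true with hys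
  have hysnd : (ys.map (fun p : Int × Int => p.1)).Nodup :=
    (((PySem.List.sorted_perm _ _ _).map (fun p : Int × Int => p.1)).nodup_iff).mpr hknd
  have h1 : (PySem.Dict.ofList ys).items = ys := pv_items_ofList_int ys hysnd
  rw [h1]
  -- sorting the permuted items by node = pvXs
  have h2 : PySem.List.sorted ys (fun it : Int × Int => it.1) false = pvXs l := by
    refine PySem.List.sorted_eq_of_perm_of_pairwise_lt _ _ _ ?_ (pvXs_pairwise l)
    exact ((PySem.List.sorted_perm _ _ _).trans (PySem.List.sorted_perm _ _ _).symm)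
  rw [h2]
  -- the grouping fold
  have h3 : pvGroupStep = fun g p => g.modify p.2 [] (· ++ [p.1]) :=
    funext fun g => funext fun p => pvGroupStep_eq_modify g p
  rw [h3]
  have h4 : (pvXs l).foldl (fun g p => g.modify p.2 [] (· ++ [p.1])) PySem.Dict.empty =
      ((pvXs l).map Prod.swap).foldl (fun g q => g.modify q.1 [] (· ++ [q.2])) PySem.Dict.empty := by
    rw [List.foldl_map]
    rfl
  rw [h4]
  set grouped := ((pvXs l).map Prod.swap).foldl (fun g q => g.modify q.1 [] (· ++ [q.2])) PySem.Dict.empty with hg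
  have hgkeys : grouped.keys = PySem.Set.ofList ((pvXs l).map (fun p => p.2)) := by
    rw [hg, PySem.Dict.keys_foldl_modify_key]
    simp [PySem.Dict.keys_empty, PySem.Set.update_nil_left, List.map_map, Function.comp_def, Prod.swap]
  have hgnd : grouped.keys.Nodup := by
    rw [hg]
    exact PySem.Dict.nodup_keys_foldl_modify_key _ _ _ _ _ (by simp [PySem.Dict.nodup_keys_empty])
  have hgetD : ∀ t, grouped.getD t [] = pvGA l t := by
    intro t
    rw [hg, PySem.Dict.getD_foldl_modify_append]
    simp only [PySem.Dict.getD_empty, List.nil_append]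
    unfold pvGA
    rw [List.filter_map, List.map_map]
    simp [Function.comp_def, Prod.swap]
  have hitems : grouped.items =
      (PySem.Set.ofList ((pvXs l).map (fun p => p.2))).map (fun t => (t, pvGA l t)) := by
    rw [PySem.Dict.items_eq_map_keys grouped hgnd []]
    rw [hgkeys]
    exact List.map_congr_left (fun t _ => by rw [hgetD])
  -- the final sort
  have h5 : PySem.List.sorted grouped.items (fun x : Int × List Int => x.1) false =
      (pvK l).map (fun t => (t, pvGA l t)) := by
    refine PySem.List.sorted_eq_of_perm_of_pairwise_lt _ _ _ ?_ ?_
    · rw [hitems]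
      exact (PySem.List.sorted_perm _ _ _).map _
    · have := PySem.List.sorted_ofList_pairwise_lt ((pvXs l).map (fun p => p.2))
      unfold pvK
      rw [List.pairwise_map]
      exact this
  rw [h5]
  refine pv_items_ofList _ ?_
  rw [List.map_map]
  have : ((fun x : Int × List Int => x.1) ∘ fun t => (t, pvGA l t)) = id := rfl
  rw [this, List.map_id]
  exact ((PySem.List.sorted_perm _ _ _).nodup_iff).mpr (PySem.Set.nodup_ofList _)

-- ---- B-side ----

theorem pvBStep_eq (l : List (Int × List (List Int))) (sg : PySem.Set Int × PySem.Dict Int (List Int)) (ts : Int) :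
    pvBStep l sg ts = (pvEvList l ts).foldl pvEvStep sg := by
  unfold pvBStep pvEvList
  rw [List.foldl_map, ← List.foldl_flatten]
  rfl

theorem pvB_fold_eq (l : List (Int × List (List Int))) :
    (pvKs l).foldl (pvBStep l) (PySem.Set.empty, PySem.Dict.empty) =
      (pvEvents l).foldl pvEvStep (PySem.Set.empty, PySem.Dict.empty) := by
  have h : pvBStep l = fun sg ts => (pvEvList l ts).foldl pvEvStep sg :=
    funext fun sg => funext fun ts => pvBStep_eq l sg ts
  rw [h]
  have h2 : pvEvents l = ((pvKs l).map (pvEvList l)).flatten := by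
    simp [pvEvents, List.flatMap]
  rw [h2, List.foldl_flatten, List.foldl_map]

theorem pvNews_foldl : ∀ (evs : List (Int × Int)) (s : PySem.Set Int) (g : PySem.Dict Int (List Int)),
    (evs.foldl pvEvStep (s, g)).2 =
      (pvNews s evs).foldl (fun g e => g.modify e.1 [] (· ++ [e.2])) g := by
  intro evs
  induction evs with
  | nil => intro s g; simp [pvNews]
  | cons e evs ih =>
    intro s g
    by_cases h : PySem.Set.contains s e.2
    · simp only [List.foldl_cons, pvEvStep, h, if_true, pvNews, ih]
    · simp only [List.foldl_cons, pvEvStep, h, if_false, pvNews, Bool.false_eq_true, ih]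

theorem pvNews_sublist : ∀ (evs : List (Int × Int)) (s : PySem.Set Int), (pvNews s evs).Sublist evs := by
  intro evs
  induction evs with
  | nil => intro s; simp [pvNews]
  | cons e evs ih =>
    intro s
    unfold pvNews
    by_cases h : PySem.Set.contains s e.2
    · simp only [h, if_true]
      exact (ih s).cons e
    · simp only [h, Bool.false_eq_true, if_false]
      exact (ih _).cons₂ e

theorem pvNews_snd (evs : List (Int × Int)) : ∀ (s : PySem.Set Int),
    ((pvNews s evs).map (fun e => e.2)).Nodup ∧
      ∀ m ∈ (pvNews s evs).map (fun e => e.2), ¬ m ∈ s := by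
  induction evs with
  | nil => intro s; simp [pvNews]
  | cons e evs ih =>
    intro s
    unfold pvNews
    by_cases hc : PySem.Set.contains s e.2
    · rw [if_pos hc]; exact ih s
    · rw [if_neg hc]
      obtain ⟨ih1, ih2⟩ := ih (PySem.Set.add s e.2)
      have hms : ¬ e.2 ∈ s := fun hm => hc ((pv_set_contains s e.2).mpr hm)
      constructor
      · rw [List.map_cons]
        refine List.Nodup.cons (fun hmem => ?_) ih1
        exact (ih2 e.2 hmem) ((PySem.Set.mem_add _ _ _).mpr (Or.inr rfl))
      · intro m hm
        rw [List.map_cons] at hm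
        rcases List.mem_cons.mp hm with h' | h'
        · subst h'; exact hms
        · exact fun hms' => (ih2 m h') ((PySem.Set.mem_add _ _ _).mpr (Or.inl hms'))

theorem pvNews_mem : ∀ (evs : List (Int × Int)) (s : PySem.Set Int) (t n : Int),
    (t, n) ∈ pvNews s evs ↔ (¬ n ∈ s ∧ evs.find? (fun e => e.2 == n) = some (t, n)) := by
  intro evs
  induction evs with
  | nil => intro s t n; simp [pvNews]
  | cons e evs ih =>
    intro s t n
    obtain ⟨t', m⟩ := e
    unfold pvNews
    by_cases hc : PySem.Set.contains s m
    · rw [if_pos hc, ih]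
      have hms : m ∈ s := (pv_set_contains s m).mp hc
      by_cases hn : m = n
      · subst hn
        rw [List.find?_cons_of_pos (by simp)]
        simp [hms]
      · rw [List.find?_cons_of_neg (by simp [hn])]
    · rw [if_neg hc, List.mem_cons, ih]
      have hms : ¬ m ∈ s := fun hm => hc ((pv_set_contains s m).mpr hm)
      by_cases hn : m = n
      · subst hn
        rw [List.find?_cons_of_pos (by simp)]
        constructor
        · rintro (h | ⟨h1, h2⟩)
          · refine ⟨hms, ?_⟩
            injection h with ha hb
            rw [ha]
          · exact absurd ((PySem.Set.mem_add _ _ _).mpr (Or.inr rfl)) h1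
        · rintro ⟨h1, h2⟩
          left
          injection h2 with h2
          exact h2.symm
      · rw [List.find?_cons_of_neg (by simp [hn])]
        constructor
        · rintro (h | ⟨h1, h2⟩)
          · exfalso; injection h with ha hb; exact hn hb.symm
          · exact ⟨fun hns => h1 ((PySem.Set.mem_add _ _ _).mpr (Or.inl hns)), h2⟩
        · rintro ⟨h1, h2⟩
          right
          refine ⟨?_, h2⟩
          intro hadd
          rcases (PySem.Set.mem_add _ _ _).mp hadd with h | h
          · exact h1 h
          · exact hn h.symm

-- find? over the event list = find? over the sorted keys
theorem pv_find_events (l : List (Int × List (List Int))) (n : Int) :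
    (pvEvents l).find? (fun e => e.2 == n) =
      ((pvKs l).find? (fun ts => (((PySem.Dict.mk l).getD ts []).flatten).contains n)).map (fun ts => (ts, n)) := by
  unfold pvEvents
  induction pvKs l with
  | nil => simp
  | cons ts ks ih =>
    rw [List.flatMap_cons, List.find?_append]
    have hfind : (pvEvList l ts).find? (fun e => e.2 == n) =
        if (((PySem.Dict.mk l).getD ts []).flatten).contains n then some (ts, n) else none := by
      unfold pvEvList
      rw [List.find?_map]
      have : ((fun e : Int × Int => e.2 == n) ∘ fun n' => (ts, n')) = fun m => m == n := rfl
      rw [this, pv_find?_beq]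
      by_cases h : n ∈ ((PySem.Dict.mk l).getD ts []).flatten <;> simp [h]
    by_cases h : n ∈ ((PySem.Dict.mk l).getD ts []).flatten
    · have hb : (((PySem.Dict.mk l).getD ts []).flatten).contains n = true := by simpa using h
      rw [List.find?_cons_of_pos (p := fun u => (((PySem.Dict.mk l).getD u []).flatten).contains n) hb,
          hfind, if_pos hb]
      simp
    · have hb : (((PySem.Dict.mk l).getD ts []).flatten).contains n = false := by simpa using h
      rw [List.find?_cons_of_neg (p := fun u => (((PySem.Dict.mk l).getD u []).flatten).contains n)
            (show ¬((((PySem.Dict.mk l).getD ts []).flatten).contains n = true) by rw [hb]; simp),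
          hfind, if_neg (by rw [hb]; simp)]
      simpa using ih

theorem pv_find_min (n : Int) (P : Int → Bool) (Q : Int → Prop) :
    ∀ (ks : List Int), ks.Pairwise (· < ·) → (∀ ts ∈ ks, (P ts = true ↔ Q ts)) →
      (∀ u, Q u → u ∈ ks) → ∀ t, (ks.find? P = some t ↔ (Q t ∧ ∀ u, Q u → t ≤ u)) := by
  intro ks
  induction ks with
  | nil =>
    intro _ _ hin t
    simp only [List.find?_nil]
    constructor
    · intro h; cases h
    · rintro ⟨h1, _⟩; exact absurd (hin t h1) (by simp)
  | cons a ks ih =>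
    intro hpw hQ hin t
    have hpw' := (List.pairwise_cons.mp hpw).2
    have halt := (List.pairwise_cons.mp hpw).1
    by_cases hPa : P a = true
    · rw [List.find?_cons_of_pos hPa]
      have hQa : Q a := (hQ a List.mem_cons_self).mp hPa
      constructor
      · intro h
        injection h with h
        subst h
        refine ⟨hQa, ?_⟩
        intro u hu
        rcases List.mem_cons.mp (hin u hu) with h | h
        · omega
        · exact le_of_lt (halt u h)
      · rintro ⟨h1, h2⟩
        rcases List.mem_cons.mp (hin t h1) with h | h
        · simp [h]
        · exfalso
          have := halt t h
          have := h2 a hQa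
          omega
    · rw [List.find?_cons_of_neg (by simpa using hPa)]
      refine ih hpw' (fun ts hts => hQ ts (List.mem_cons_of_mem _ hts)) ?_ t
      intro u hu
      rcases List.mem_cons.mp (hin u hu) with h | h
      · exfalso; subst h; exact hPa ((hQ u List.mem_cons_self).mpr hu)
      · exact h

-- membership of the first-contact list N, under unique keys
theorem pvN_mem (l : List (Int × List (List Int)))
    (hk : (l.map Prod.fst).Nodup) (t n : Int) :
    (t, n) ∈ pvN l ↔ pvFc l n = some t := by
  have hkeys : (PySem.Dict.mk l).keys = l.map Prod.fst := rfl
  have hksnd : (pvKs l).Nodup := by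
    unfold pvKs
    exact ((PySem.List.sorted_perm _ _ _).nodup_iff).mpr hk
  have hkspw : (pvKs l).Pairwise (· < ·) := by
    have hle := PySem.List.sorted_pairwise (l.map Prod.fst) (fun x : Int => x)
    exact ((hle.and hksnd).imp (fun h => lt_of_le_of_ne h.1 h.2))
  have hQiff : ∀ ts ∈ pvKs l,
      ((((PySem.Dict.mk l).getD ts []).flatten).contains n = true ↔ ts ∈ pvOccKeys l n) := by
    intro ts hts
    have htsk : ts ∈ l.map Prod.fst := by
      unfold pvKs at hts
      exact (PySem.List.mem_sorted _ _ _ _).mp hts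
    obtain ⟨p, hp, hp1⟩ := List.mem_map.mp htsk
    have hget : (PySem.Dict.mk l).get? ts = some p.2 :=
      PySem.Dict.get?_of_mem_items _ (by rw [← hp1]; simpa using hp) (by simpa [hkeys] using hk)
    have hgetD : (PySem.Dict.mk l).getD ts [] = p.2 := by
      rw [PySem.Dict.getD_eq_get?_getD, hget]; rfl
    rw [hgetD]
    constructor
    · intro hc
      refine List.mem_map.mpr ⟨p, List.mem_filter.mpr ⟨hp, ?_⟩, hp1⟩
      unfold pvOcc
      simp only [List.any_eq_true]
      rcases List.mem_flatten.mp (by simpa using hc) with ⟨hl, hhl, hnhl⟩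
      exact ⟨hl, hhl, by simpa using hnhl⟩
    · intro hmem
      obtain ⟨q, hq, hq1⟩ := List.mem_map.mp hmem
      have hql := List.mem_filter.mp hq
      -- q and p have the same key ts; unique keys force q = p
      have hqp : q = p := by
        have hgq : (PySem.Dict.mk l).get? ts = some q.2 :=
          PySem.Dict.get?_of_mem_items _ (by rw [← hq1]; simpa using hql.1) (by simpa [hkeys] using hk)
        have h2 : q.2 = p.2 := by
          rw [hget] at hgq; injection hgq with h; exact h.symm
        have h1 : q.1 = p.1 := by rw [hq1, hp1]
        exact Prod.ext h1 h2
      have hocc : pvOcc p n = true := hqp ▸ hql.2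
      unfold pvOcc at hocc
      simp only [List.any_eq_true] at hocc
      obtain ⟨hl, hhl, hnhl⟩ := hocc
      have : n ∈ p.2.flatten := List.mem_flatten.mpr ⟨hl, hhl, by simpa using hnhl⟩
      simpa using this
  have hin : ∀ u, u ∈ pvOccKeys l n → u ∈ pvKs l := by
    intro u hu
    obtain ⟨p, hp, hp1⟩ := List.mem_map.mp hu
    unfold pvKs
    rw [PySem.List.mem_sorted]
    exact List.mem_map.mpr ⟨p, (List.mem_filter.mp hp).1, hp1⟩
  have hmain := pv_find_min n (fun ts => (((PySem.Dict.mk l).getD ts []).flatten).contains n)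
      (fun ts => ts ∈ pvOccKeys l n) (pvKs l) hkspw hQiff hin t
  unfold pvN
  rw [pvNews_mem, pv_find_events]
  simp only [List.not_mem_nil, not_false_eq_true, true_and]
  rw [pvFc_some_iff]
  constructor
  · intro h2
    have hX : (pvKs l).find? (fun ts => (((PySem.Dict.mk l).getD ts []).flatten).contains n) = some t := by
      cases hf : (pvKs l).find? (fun ts => (((PySem.Dict.mk l).getD ts []).flatten).contains n) with
      | none => rw [hf] at h2; simp at h2
      | some a =>
        rw [hf] at h2
        simp only [Option.map_some, Option.some.injEq] at h2
        injection h2 with ha hb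
        rw [ha]
    exact hmain.mp hX
  · intro h
    have hX := hmain.mpr h
    rw [hX]
    rfl

-- events' timestamps are nondecreasing, hence so are N's
theorem pvEvents_fst_pairwise (l : List (Int × List (List Int))) :
    ((pvEvents l).map (fun e => e.1)).Pairwise (· ≤ ·) := by
  have h2 : pvEvents l = ((pvKs l).map (pvEvList l)).flatten := by
    simp [pvEvents, List.flatMap]
  rw [h2, List.map_flatten, List.map_map]
  rw [List.pairwise_flatten]
  constructor
  · intro inner hi
    obtain ⟨ts, hts, hts1⟩ := List.mem_map.mp hi
    subst hts1
    simp only [Function.comp_def]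
    unfold pvEvList
    rw [List.map_map]
    rw [List.pairwise_map]
    exact pv_pairwise_of_forall (fun _ _ => le_refl ts) _
  · rw [List.pairwise_map]
    have hle : (pvKs l).Pairwise (· ≤ ·) := PySem.List.sorted_pairwise _ _
    refine hle.imp ?_
    intro a b hab
    intro x hx y hy
    simp only [Function.comp_def] at hx hy
    unfold pvEvList at hx hy
    rw [List.map_map] at hx hy
    obtain ⟨_, _, hx1⟩ := List.mem_map.mp hx
    obtain ⟨_, _, hy1⟩ := List.mem_map.mp hy
    simp at hx1 hy1
    omega

theorem pvN_fst_pairwise (l : List (Int × List (List Int))) :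
    ((pvN l).map (fun e => e.1)).Pairwise (· ≤ ·) := by
  refine List.Pairwise.sublist ?_ (pvEvents_fst_pairwise l)
  exact (pvNews_sublist (pvEvents l) []).map _

theorem pvB_eq (l : List (Int × List (List Int))) (hk : (l.map Prod.fst).Nodup) :
    calculate_nodes_by_first_contact_timestamp_alt l = (pvK l).map (fun t => (t, pvGA l t)) := by
  unfold calculate_nodes_by_first_contact_timestamp_alt
  dsimp only
  rw [show PySem.List.sorted (l.map Prod.fst) (fun x => x) false = pvKs l from rfl]
  rw [pvB_fold_eq, pvNews_foldl]
  rw [show pvNews PySem.Set.empty (pvEvents l) = pvN l from rfl]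
  set groups := (pvN l).foldl (fun g e => g.modify e.1 [] (· ++ [e.2])) PySem.Dict.empty with hgdef
  have hknd : groups.keys.Nodup := by
    rw [hgdef]
    exact PySem.Dict.nodup_keys_foldl_modify_key _ _ _ _ _ (by simp [PySem.Dict.nodup_keys_empty])
  have hkeys : groups.keys = PySem.Set.ofList ((pvN l).map (fun e => e.1)) := by
    rw [hgdef, PySem.Dict.keys_foldl_modify_key]
    simp [PySem.Dict.keys_empty, PySem.Set.update_nil_left]
  have hgetD : ∀ t, groups.getD t [] = ((pvN l).filter (fun e => e.1 == t)).map (fun e => e.2) := by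
    intro t
    rw [hgdef, PySem.Dict.getD_foldl_modify_append]
    simp [PySem.Dict.getD_empty]
  -- keys list equals pvK
  have hSb : groups.keys = pvK l := by
    rw [hkeys]
    unfold pvK
    refine (PySem.List.sorted_eq_of_perm_of_pairwise_lt _ _ _ ?_ ?_).symm
    · refine (List.perm_ext_iff_of_nodup (PySem.Set.nodup_ofList _) (PySem.Set.nodup_ofList _)).mpr ?_
      intro t
      rw [PySem.Set.mem_ofList, PySem.Set.mem_ofList]
      constructor
      · intro h
        obtain ⟨e, he, he1⟩ := List.mem_map.mp h
        have : pvFc l e.2 = some t := by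
          rw [← pvN_mem l hk]
          rw [← he1]
          simpa using he
        refine List.mem_map.mpr ⟨(e.2, t), ?_, rfl⟩
        rw [pvXs_mem]
        exact this
      · intro h
        obtain ⟨p, hp, hp1⟩ := List.mem_map.mp h
        have : pvFc l p.1 = some t := by
          rw [← pvXs_mem]
          rw [← hp1]
          simpa using hp
        refine List.mem_map.mpr ⟨(t, p.1), ?_, rfl⟩
        rw [pvN_mem l hk]
        exact this
    · have hle : ((pvN l).map (fun e => e.1)).Pairwise (· ≤ ·) := pvN_fst_pairwise l
      have hsub : (PySem.Set.ofList ((pvN l).map (fun e => e.1))).Sublist ((pvN l).map (fun e => e.1)) :=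
        pv_ofList_sublist _
      have hle' := hle.sublist hsub
      have hnd := PySem.Set.nodup_ofList ((pvN l).map (fun e => e.1))
      exact (hle'.and hnd).imp (fun h => lt_of_le_of_ne h.1 h.2)
  -- values: the sorted group equals A's group
  have hgrp : ∀ t, PySem.List.sorted (((pvN l).filter (fun e => e.1 == t)).map (fun e => e.2)) (fun x => x) false = pvGA l t := by
    intro t
    refine PySem.List.sorted_eq_of_perm_of_pairwise_lt _ _ _ ?_ ?_
    · refine (List.perm_ext_iff_of_nodup ?_ ?_).mpr ?_
      · -- pvGA nodup
        have hpw : (pvGA l t).Pairwise (· < ·) := by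
          unfold pvGA
          rw [List.pairwise_map]
          exact (pvXs_pairwise l).sublist List.filter_sublist
        exact hpw.imp ne_of_lt
      · refine List.Nodup.sublist ?_ ((pvNews_snd (pvEvents l) []).1)
        exact List.Sublist.map _ List.filter_sublist
      · intro n
        unfold pvGA
        constructor
        · intro h
          obtain ⟨p, hp, hp1⟩ := List.mem_map.mp h
          have hf := List.mem_filter.mp hp
          have : pvFc l n = some t := by
            rw [← pvXs_mem]
            have ht : p.2 = t := by simpa using hf.2
            have : p = (n, t) := Prod.ext hp1 ht
            rw [← this]; exact hf.1
          refine List.mem_map.mpr ⟨(t, n), List.mem_filter.mpr ⟨?_, by simp⟩, rfl⟩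
          rw [pvN_mem l hk]
          exact this
        · intro h
          obtain ⟨e, he, he1⟩ := List.mem_map.mp h
          have hf := List.mem_filter.mp he
          have het : e.1 = t := by simpa using hf.2
          have : e = (t, n) := Prod.ext het he1
          rw [this] at hf
          have : pvFc l n = some t := by rw [← pvN_mem l hk]; exact hf.1
          refine List.mem_map.mpr ⟨(n, t), List.mem_filter.mpr ⟨?_, by simp⟩, rfl⟩
          rw [pvXs_mem]
          exact this
    · unfold pvGA
      rw [List.pairwise_map]
      exact (pvXs_pairwise l).sublist List.filter_sublist
  rw [PySem.Dict.items_eq_map_keys groups hknd [], List.map_map]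
  rw [hSb]
  refine List.map_congr_left ?_
  intro t _
  simp only [Function.comp_def]
  rw [hgetD t, hgrp t]

-- ===== VERDICT (by name: the statement is the Claim_ definition above) =====
theorem calculate_nodes_by_first_contact_timestamp_spec : Claim_equal_calculate_nodes_by_first_contact_timestamp := by
  intro l _ hpre
  unfold Spec_calculate_nodes_by_first_contact_timestamp
  rw [pvA_eq, pvB_eq l hpre]
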